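-- pv_equiv track=rewrite | github.com/weird0cats/Mr-Petts | jokescripts.py | doubleword
-- ===== SOURCE A (Python) =====
-- def doubleword(phrase,ref):
--     word=phrase.split()
--     new=""
--     for i in range(3):
--         new+=f'{word[i]} '
--         if i==ref-1:
--             new+=f'{word[ref-1]} '
--     string=""
--     for n in range(len(new)-1):
--         string+=new[n]
--     return string
-- ===== SOURCE B (Python) =====
-- def doubleword(phrase, ref):
--     words = phrase.split()
--     out = [words[0], words[1], words[2]]
--     if 1 <= ref <= 3:
--         out.insert(ref, out[ref - 1])
--     return ' '.join(out)
-- ===== Notes on version B (the rewrite author's own statement) =====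
-- stated objective: simpler
-- what changed: Replaces the char-by-char concatenation loop and the trailing-space-strip loop with building a 3-word list, list.insert to duplicate the ref-th word, and ' '.join.
import Mathlib
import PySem

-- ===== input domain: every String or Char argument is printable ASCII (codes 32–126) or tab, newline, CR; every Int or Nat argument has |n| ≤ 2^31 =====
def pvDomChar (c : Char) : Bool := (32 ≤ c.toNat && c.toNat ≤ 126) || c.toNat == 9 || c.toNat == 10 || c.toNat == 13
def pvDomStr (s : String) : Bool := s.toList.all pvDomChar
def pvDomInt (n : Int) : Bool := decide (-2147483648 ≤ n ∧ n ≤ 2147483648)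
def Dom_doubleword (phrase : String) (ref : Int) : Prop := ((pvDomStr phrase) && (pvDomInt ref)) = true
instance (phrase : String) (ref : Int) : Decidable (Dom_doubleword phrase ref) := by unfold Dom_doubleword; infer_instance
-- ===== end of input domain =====

-- B builds a 3-word list, duplicates the ref-th word with list.insert, and joins with ' ',
-- replacing A's char-by-char concatenation loop and trailing-space-strip loop (objective: simpler).

-- ===== PORT A =====
def doubleword (phrase : String) (ref : Int) : String :=
  let word := PySem.Str.split₀ phrase
  -- word[i]: pyGetD is exact here because Pre_ guarantees at least 3 words
  let new := (PySem.List.pyRange 0 3 1).foldl (fun new i =>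
      let new := new ++ PySem.List.pyGetD word i "" ++ " "
      if i = ref - 1 then new ++ PySem.List.pyGetD word (ref - 1) "" ++ " " else new) ""
  (PySem.List.pyRange 0 (PySem.Str.len new - 1) 1).foldl
      (fun s n => s ++ String.singleton ((PySem.Str.pyGet? new n).getD ' ')) ""

-- ===== PORT B =====
def doubleword_alt (phrase : String) (ref : Int) : String :=
  let words := PySem.Str.split₀ phrase
  -- words[0..2]: pyGetD is exact here because Pre_ guarantees at least 3 words
  let out := [PySem.List.pyGetD words 0 "", PySem.List.pyGetD words 1 "", PySem.List.pyGetD words 2 ""]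
  let out := if 1 ≤ ref ∧ ref ≤ 3 then PySem.List.insert out ref (PySem.List.pyGetD out (ref - 1) "") else out
  PySem.Str.join " " out

-- ===== PRECONDITION & SPEC =====
-- Pre_ excludes exactly the phrases with fewer than 3 words, on which the Python A raises IndexError.
def Pre_doubleword (phrase : String) (ref : Int) : Prop := 3 ≤ (PySem.Str.split₀ phrase).length
instance (phrase : String) (ref : Int) : Decidable (Pre_doubleword phrase ref) := by unfold Pre_doubleword; infer_instance
def pvWitness_doubleword : String × Int := ("the old cat", 2)

def Spec_doubleword (phrase : String) (ref : Int) (out : String) : Prop := out = doubleword_alt phrase ref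
instance (phrase : String) (ref : Int) (out : String) : Decidable (Spec_doubleword phrase ref out) := by unfold Spec_doubleword; infer_instance

-- ===== CLAIM (what is proved, stated in full; the proofs are below) =====
def Claim_equal_doubleword : Prop := ∀ (phrase : String) (ref : Int), Dom_doubleword phrase ref → Pre_doubleword phrase ref → Spec_doubleword phrase ref (doubleword phrase ref)

-- ===== LEMMAS AND PROOFS =====

-- the char-copy loop: appending f n for each n builds init ++ map f
lemma foldl_push_toList {α : Type} (l : List α) (f : α → Char) (init : String) :
    (l.foldl (fun acc n => acc ++ String.singleton (f n)) init).toList = init.toList ++ l.map f := by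
  induction l generalizing init with
  | nil => simp
  | cons x xs ih => rw [List.foldl_cons, ih]; simp

lemma map_range_getD (l : List Char) (m : Nat) (h : m ≤ l.length) :
    (List.range m).map (fun k => l[k]?.getD ' ') = l.take m := by
  induction m with
  | zero => simp
  | succ n ih =>
      rw [List.range_succ, List.map_append, ih (by omega), List.take_add_one]
      simp [List.getElem?_eq_getElem (by omega : n < l.length)]

-- A's second loop (string += new[n] for n in range(len(new)-1)) copies all but the last char
lemma secondLoop (s : String) :
    ((PySem.List.pyRange 0 (PySem.Str.len s - 1) 1).foldl
      (fun acc n => acc ++ String.singleton ((PySem.Str.pyGet? s n).getD ' ')) "").toList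
      = s.toList.dropLast := by
  rw [PySem.List.pyRange_one, List.foldl_map,
    foldl_push_toList (f := fun k => (PySem.Str.pyGet? s ((0:Int) + (k:Nat))).getD ' ')]
  have : ((List.range (PySem.Str.len s - 1 - 0).toNat).map
      (fun k => (PySem.Str.pyGet? s ((0:Int) + (k:Nat))).getD ' '))
      = (List.range (s.toList.length - 1)).map (fun k => s.toList[k]?.getD ' ') := by
    simp [PySem.Str.len_eq]
  rw [this, map_range_getD _ _ (by omega), List.dropLast_eq_take]
  simp

-- ===== VERDICT (by name: the statement is the Claim_ definition above) =====
theorem doubleword_spec : Claim_equal_doubleword := by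
  intro phrase ref _ hpre
  unfold Pre_doubleword at hpre
  unfold Spec_doubleword doubleword doubleword_alt
  obtain ⟨a, b, c, t, hws⟩ : ∃ a b c t, PySem.Str.split₀ phrase = a :: b :: c :: t := by
    match h : PySem.Str.split₀ phrase with
    | a :: b :: c :: t => exact ⟨a,b,c,t, rfl⟩
    | [] | [_] | [_,_] => rw [h] at hpre; simp at hpre
  simp only [hws]
  have hr : PySem.List.pyRange 0 3 1 = [0,1,2] := by decide
  have g0 : PySem.List.pyGetD (a::b::c::t) (0:Int) "" = a := by rw [PySem.List.pyGetD_ofNat']; rfl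
  have g1 : PySem.List.pyGetD (a::b::c::t) (1:Int) "" = b := by rw [PySem.List.pyGetD_ofNat']; rfl
  have g2 : PySem.List.pyGetD (a::b::c::t) (2:Int) "" = c := by rw [PySem.List.pyGetD_ofNat']; rfl
  have g0' : PySem.List.pyGetD [a,b,c] (0:Int) "" = a := by rw [PySem.List.pyGetD_ofNat']; rfl
  have g1' : PySem.List.pyGetD [a,b,c] (1:Int) "" = b := by rw [PySem.List.pyGetD_ofNat']; rfl
  have g2' : PySem.List.pyGetD [a,b,c] (2:Int) "" = c := by rw [PySem.List.pyGetD_ofNat']; rfl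
  have hsp : (" " : String).toList = [' '] := rfl
  rw [hr]
  refine String.toList_inj.mp ?_
  rw [secondLoop]
  by_cases h1 : ref = 1
  · subst h1
    have hins : PySem.List.insert [a,b,c] (1:Int) a = [a,a,b,c] := by
      rw [PySem.List.insert_ofNat _ 1 _ (by simp)]; simp
    simp only [List.foldl_cons, List.foldl_nil, g0, g1, g2]
    norm_num [g0, g0']
    rw [hins]
    simp only [hsp, List.map_cons, List.map_nil, PySem.Chars.join_cons_cons,
      PySem.Chars.join_singleton, ← List.append_assoc, List.dropLast_concat]
  · by_cases h2 : ref = 2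
    · subst h2
      have hins : PySem.List.insert [a,b,c] (2:Int) b = [a,b,b,c] := by
        rw [PySem.List.insert_ofNat _ 2 _ (by simp)]; simp
      simp only [List.foldl_cons, List.foldl_nil, g0, g1, g2]
      norm_num [g1, g1']
      rw [hins]
      simp only [hsp, List.map_cons, List.map_nil, PySem.Chars.join_cons_cons,
        PySem.Chars.join_singleton, ← List.append_assoc, List.dropLast_concat]
    · by_cases h3 : ref = 3
      · subst h3
        have hins : PySem.List.insert [a,b,c] (3:Int) c = [a,b,c,c] := by
          rw [PySem.List.insert_ofNat _ 3 _ (by simp)]; simp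
        simp only [List.foldl_cons, List.foldl_nil, g0, g1, g2]
        norm_num [g2, g2']
        rw [hins]
        simp only [hsp, List.map_cons, List.map_nil, PySem.Chars.join_cons_cons,
          PySem.Chars.join_singleton, ← List.append_assoc, List.dropLast_concat]
      · simp only [List.foldl_cons, List.foldl_nil, g0, g1, g2,
          if_neg (by omega : ¬ (0:Int) = ref - 1), if_neg (by omega : ¬ (1:Int) = ref - 1),
          if_neg (by omega : ¬ (2:Int) = ref - 1), if_neg (by omega : ¬ (1 ≤ ref ∧ ref ≤ 3))]
        simp only [String.toList_append, String.toList_empty, PySem.Str.toList_join, hsp,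
          List.map_cons, List.map_nil, PySem.Chars.join_cons_cons,
          PySem.Chars.join_singleton, ← List.append_assoc, List.dropLast_concat, List.nil_append]
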